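-- pv_equiv track=rewrite | github.com/wlu03/structure_descent | src/data/schema_map.py | _backtick_preprocess
-- ===== SOURCE A (Python) =====
-- class CompositeFormulaError(ValueError):
--     """Raised when a composite formula references an unsupported AST node, an
--     unknown column, or a non-whitelisted function."""
--
-- def _backtick_preprocess(formula: str) -> tuple[str, dict[str, str]]:
--     """Replace backtick-quoted column names with a safe identifier.
--
--     Returns the rewritten formula and a mapping ``safe_ident -> original_name``
--     so ``ast.Name`` lookups can round-trip.
--
--     Example: ``5 - (`Q-personal-diabetes` == 'Yes')`` becomes
--     ``5 - (_bt_0 == 'Yes')`` with ``{"_bt_0": "Q-personal-diabetes"}``.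
--     """
--     out_chars: list[str] = []
--     alias_by_name: dict[str, str] = {}
--     name_by_alias: dict[str, str] = {}
--     i = 0
--     n = len(formula)
--     while i < n:
--         ch = formula[i]
--         if ch == "`":
--             j = formula.find("`", i + 1)
--             if j < 0:
--                 raise CompositeFormulaError(
--                     f"Unterminated backtick quote in formula: {formula!r}."
--                 )
--             original = formula[i + 1 : j]
--             if not original:
--                 raise CompositeFormulaError(
--                     f"Empty backtick-quoted identifier in formula: {formula!r}."
--                 )
--             if original in alias_by_name:
--                 alias = alias_by_name[original]
--             else:
--                 alias = f"_bt_{len(alias_by_name)}"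
--                 alias_by_name[original] = alias
--                 name_by_alias[alias] = original
--             out_chars.append(alias)
--             i = j + 1
--         else:
--             out_chars.append(ch)
--             i += 1
--     return "".join(out_chars), name_by_alias
-- ===== SOURCE B (Python) =====
-- class CompositeFormulaError(ValueError):
--     """Raised when a composite formula references an unsupported AST node, an
--     unknown column, or a non-whitelisted function."""
--
-- def _backtick_preprocess(formula: str) -> tuple[str, dict[str, str]]:
--     """Split-based rewrite: cut the formula at every backtick; the pieces then
--     alternate literal, quoted-name, literal, ... An even piece count means an
--     unterminated quote."""
--     parts = formula.split("`")
--     if len(parts) % 2 == 0: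
--         raise CompositeFormulaError(
--             f"Unterminated backtick quote in formula: {formula!r}."
--         )
--     alias_by_name: dict[str, str] = {}
--     name_by_alias: dict[str, str] = {}
--     pieces = [parts[0]]
--     for k in range(1, len(parts), 2):
--         name = parts[k]
--         if not name:
--             raise CompositeFormulaError(
--                 f"Empty backtick-quoted identifier in formula: {formula!r}."
--             )
--         alias = alias_by_name.get(name)
--         if alias is None:
--             alias = f"_bt_{len(alias_by_name)}"
--             alias_by_name[name] = alias
--             name_by_alias[alias] = name
--         pieces.append(alias)
--         pieces.append(parts[k + 1])
--     return "".join(pieces), name_by_alias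
-- ===== Notes on version B (the rewrite author's own statement) =====
-- stated objective: idiomatic
-- what changed: Replaces the manual index loop with formula.find by a single str.split('`') whose pieces alternate literal/quoted-name and a pairwise fold over those pieces; an even piece count signals the unterminated quote.
import Mathlib
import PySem

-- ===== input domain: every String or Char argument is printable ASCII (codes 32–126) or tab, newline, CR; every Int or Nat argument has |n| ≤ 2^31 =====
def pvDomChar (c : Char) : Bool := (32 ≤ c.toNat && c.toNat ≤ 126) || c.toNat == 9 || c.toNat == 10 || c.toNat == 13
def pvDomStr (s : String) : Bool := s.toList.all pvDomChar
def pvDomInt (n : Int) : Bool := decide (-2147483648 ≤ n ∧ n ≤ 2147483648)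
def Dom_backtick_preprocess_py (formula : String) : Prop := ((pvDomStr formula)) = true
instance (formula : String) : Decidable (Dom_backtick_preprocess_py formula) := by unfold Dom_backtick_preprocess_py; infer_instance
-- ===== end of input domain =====

-- B replaces A's manual index loop (find the closing backtick, slice, jump) by one
-- split on '`' whose pieces alternate literal/quoted-name, folded pairwise (idiomatic;
-- same cost). Both raise on unterminated quotes and empty names; those inputs are
-- outside Pre_ and both ports return ("", []) there.

-- ===== PORT A =====
-- A's while loop over the index i, as structural recursion on the remaining characters:
-- formula.find("`", i+1) becomes Chars.find on the rest, the slice formula[i+1:j]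
-- becomes take/drop.  `none` = the two `raise` statements.
def pvLoopA : List Char → List (List Char) → PySem.Dict (List Char) (List Char) →
    PySem.Dict (List Char) (List Char) →
    Option (List (List Char) × PySem.Dict (List Char) (List Char))
  | [], out, _, nba => some (out, nba)
  | c :: rest, out, abn, nba =>
    if c = '`' then
      let j := PySem.Chars.find rest ['`']
      if j = -1 then none                      -- Unterminated backtick quote
      else
        let original := rest.take j.toNat
        if original = [] then none             -- Empty backtick-quoted identifier
        else
          match abn.get? original with
          | some al => pvLoopA (rest.drop (j.toNat + 1)) (out ++ [al]) abn nba
          | none =>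
            let al := '_' :: 'b' :: 't' :: '_' :: PySem.Int.toChars (abn.size : Int)
            pvLoopA (rest.drop (j.toNat + 1)) (out ++ [al])
              (abn.insert original al) (nba.insert al original)
    else pvLoopA rest (out ++ [[c]]) abn nba
  termination_by cs => cs.length
  decreasing_by all_goals (simp; try omega)

def backtick_preprocess_py (formula : String) : String × (List (String × String)) :=
  match pvLoopA formula.toList [] PySem.Dict.empty PySem.Dict.empty with
  | none => ("", [])                           -- A raises here (outside Pre_)
  | some (out, nba) =>
    (String.ofList (PySem.Chars.join [] out),
     nba.items.map (fun p => (String.ofList p.1, String.ofList p.2)))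

-- ===== PORT B =====
-- B's for-loop over parts[1::2]/parts[2::2]: two pieces (name, following literal) per step.
def pvLoopB : List (List Char) → List (List Char) → PySem.Dict (List Char) (List Char) →
    PySem.Dict (List Char) (List Char) →
    Option (List (List Char) × PySem.Dict (List Char) (List Char))
  | [], pieces, _, nba => some (pieces, nba)
  | [_], _, _, _ => none                       -- unreachable: the pair list has even length
  | name :: lit :: rest, pieces, abn, nba =>
    if name = [] then none                     -- Empty backtick-quoted identifier
    else
      match abn.get? name with
      | some al => pvLoopB rest (pieces ++ [al, lit]) abn nba
      | none =>
        let al := '_' :: 'b' :: 't' :: '_' :: PySem.Int.toChars (abn.size : Int)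
        pvLoopB rest (pieces ++ [al, lit])
          (abn.insert name al) (nba.insert al name)

def backtick_preprocess_py_alt (formula : String) : String × (List (String × String)) :=
  if (PySem.Chars.splitOn formula.toList ['`']).length % 2 = 0 then
    ("", [])                                   -- Unterminated backtick quote (outside Pre_)
  else
    match PySem.Chars.splitOn formula.toList ['`'] with
    | [] => ("", [])                           -- unreachable: split never returns []
    | p :: ps =>
      match pvLoopB ps [p] PySem.Dict.empty PySem.Dict.empty with
      | none => ("", [])                       -- Empty identifier (outside Pre_)
      | some (pieces, nba) =>
        (String.ofList (PySem.Chars.join [] pieces),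
         nba.items.map (fun q => (String.ofList q.1, String.ofList q.2)))

-- ===== PRECONDITION & SPEC =====
-- Pre_ holds exactly where the Python A returns normally: the pieces between
-- backticks alternate literal/name/literal/…, ending on a literal (every quote is
-- terminated) with every quoted name nonempty.  A raises CompositeFormulaError
-- otherwise, so those inputs are excluded.
def pvPartsOk : List (List Char) → Bool
  | [] => false
  | [_] => true
  | _ :: name :: rest => !name.isEmpty && pvPartsOk rest

def Pre_backtick_preprocess_py (formula : String) : Prop :=
  pvPartsOk (PySem.Chars.splitOn formula.toList ['`']) = true
instance (formula : String) : Decidable (Pre_backtick_preprocess_py formula) := by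
  unfold Pre_backtick_preprocess_py; infer_instance

def pvWitness_backtick_preprocess_py : String := "5 - (`Q-a` == 'Yes') + `b` * `Q-a`"

def Spec_backtick_preprocess_py (formula : String) (out : String × (List (String × String))) : Prop := out = backtick_preprocess_py_alt formula
instance (formula : String) (out : String × (List (String × String))) : Decidable (Spec_backtick_preprocess_py formula out) := by unfold Spec_backtick_preprocess_py; infer_instance

-- ===== CLAIM (what is proved, stated in full; the proofs are below) =====
def Claim_equal_backtick_preprocess_py : Prop := ∀ (formula : String), Dom_backtick_preprocess_py formula → Pre_backtick_preprocess_py formula → Spec_backtick_preprocess_py formula (backtick_preprocess_py formula)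

-- ===== LEMMAS AND PROOFS =====

-- A structurally-recursive reading of split-on-backtick, easier to induct on.
def pvSplit : List Char → List (List Char)
  | [] => [[]]
  | c :: rest =>
    if c = '`' then [] :: pvSplit rest
    else
      match pvSplit rest with
      | [] => [[c]]
      | p :: ps => (c :: p) :: ps

theorem pvSplit_ne_nil (cs : List Char) : pvSplit cs ≠ [] := by
  cases cs with
  | nil => simp [pvSplit]
  | cons c rest =>
    simp only [pvSplit]
    split <;> simp_all <;> split <;> simp

theorem pvGo_eq (cs : List Char) : ∀ (fuel : Nat) (cur : List Char) (acc : List (List Char)),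
    cs.length ≤ fuel →
    PySem.Chars.splitOn.go ['`'] fuel cs cur acc
      = acc.reverse ++ ((pvSplit cs).modifyHead (cur.reverse ++ ·)) := by
  induction cs with
  | nil =>
    intro fuel cur acc h
    cases fuel <;> simp [PySem.Chars.splitOn.go, pvSplit]
  | cons c rest ih =>
    intro fuel cur acc h
    cases fuel with
    | zero => simp at h
    | succ fuel =>
      by_cases hc : c = '`'
      · subst hc
        rw [show PySem.Chars.splitOn.go ['`'] (fuel+1) ('`' :: rest) cur acc
              = PySem.Chars.splitOn.go ['`'] fuel rest [] (cur.reverse :: acc) by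
            simp [PySem.Chars.splitOn.go]]
        rw [ih fuel [] (cur.reverse :: acc) (by simpa using h)]
        cases hps : pvSplit rest <;> simp [pvSplit, hps]
      · rw [show PySem.Chars.splitOn.go ['`'] (fuel+1) (c :: rest) cur acc
              = PySem.Chars.splitOn.go ['`'] fuel rest (c :: cur) acc by
            simp only [PySem.Chars.splitOn.go, List.isPrefixOf]
            rw [if_neg]
            simp [hc, Ne.symm hc]]
        rw [ih fuel (c :: cur) acc (by simp at h; omega)]
        simp only [pvSplit, if_neg hc]
        rcases hps : pvSplit rest with _ | ⟨p, ps⟩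
        · exact absurd hps (pvSplit_ne_nil rest)
        · simp

theorem pvSplitOn_eq (cs : List Char) :
    PySem.Chars.splitOn cs ['`'] = pvSplit cs := by
  rw [show PySem.Chars.splitOn cs ['`'] = PySem.Chars.splitOn.go ['`'] (cs.length+1) cs [] [] from rfl]
  rw [pvGo_eq cs (cs.length+1) [] [] (by omega)]
  rcases h : pvSplit cs with _ | ⟨p, ps⟩
  · exact absurd h (pvSplit_ne_nil cs)
  · simp

theorem pvSplit_no_tick {cs : List Char} (h : '`' ∉ cs) : pvSplit cs = [cs] := by
  induction cs with
  | nil => simp [pvSplit]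
  | cons c rest ih =>
    have hc : c ≠ '`' := fun hc => h (by simp [hc])
    have hr : '`' ∉ rest := fun hr => h (by simp [hr])
    simp [pvSplit, hc, ih hr]

theorem pvSplit_append_tick {p : List Char} (r : List Char) (hp : '`' ∉ p) :
    pvSplit (p ++ '`' :: r) = p :: pvSplit r := by
  induction p with
  | nil => simp [pvSplit]
  | cons c q ih =>
    have hc : c ≠ '`' := fun hc => hp (by simp [hc])
    have hq : '`' ∉ q := fun hr => hp (by simp [hr])
    simp only [List.cons_append, pvSplit, if_neg hc, ih hq]

theorem pvJoin_flatten (l : List (List Char)) : PySem.Chars.join [] l = l.flatten := by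
  induction l with
  | nil => simp [PySem.Chars.join, List.intercalate]
  | cons a t ih =>
    cases t with
    | nil => simp [PySem.Chars.join, List.intercalate]
    | cons b t' =>
      rw [PySem.Chars.join_cons_cons, ih]
      simp

theorem pvLoopA_pre (p : List Char) (hp : '`' ∉ p) :
    ∀ (cs : List Char) (out : List (List Char)) (abn nba : PySem.Dict (List Char) (List Char)),
    pvLoopA (p ++ cs) out abn nba = pvLoopA cs (out ++ p.map (fun c => [c])) abn nba := by
  induction p with
  | nil => intro cs out abn nba; simp
  | cons c q ih =>
    intro cs out abn nba
    have hc : c ≠ '`' := fun hc => hp (by simp [hc])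
    have hq : '`' ∉ q := fun hr => hp (by simp [hr])
    rw [List.cons_append, pvLoopA, if_neg hc, ih hq]
    simp

theorem pvLoopB_odd_none :
    ∀ (ps pieces : List (List Char)) (abn nba : PySem.Dict (List Char) (List Char)),
    ps.length % 2 = 1 → pvLoopB ps pieces abn nba = none
  | [], _, _, _, h => by simp at h
  | [x], _, _, _, _ => by simp [pvLoopB]
  | a :: b :: r, pieces, abn, nba, h => by
    have hr : r.length % 2 = 1 := by simp at h; omega
    rw [pvLoopB]
    split
    · rfl
    · cases habn : abn.get? a <;>
        simp [habn, pvLoopB_odd_none r _ _ _ hr]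


theorem pvFindNoTick {cs : List Char} (h : '`' ∉ cs) : PySem.Chars.find cs ['`'] = -1 := by
  rw [PySem.Chars.find_eq_neg_one_iff]
  intro hin
  exact h (hin.mem (by simp))

theorem pvFindFirstTick (p r : List Char) (hp : '`' ∉ p) :
    PySem.Chars.find (p ++ '`' :: r) ['`'] = (p.length : Int) := by
  have hinf : ['`'] <:+: (p ++ '`' :: r) := ⟨p, r, by simp⟩
  have h0 : 0 ≤ PySem.Chars.find (p ++ '`' :: r) ['`'] :=
    (PySem.Chars.find_nonneg_iff _ _).mpr hinf
  obtain ⟨hpre, hmin⟩ := PySem.Chars.find_spec h0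
  set j := (PySem.Chars.find (p ++ '`' :: r) ['`']).toNat with hj
  have hjp : j = p.length := by
    rcases Nat.lt_trichotomy j p.length with hlt | heq | hgt
    · exfalso
      have hd : (p ++ '`' :: r).drop j = p.drop j ++ '`' :: r :=
        List.drop_append_of_le_length (le_of_lt hlt)
      have hdp : p.drop j = p[j] :: p.drop (j+1) := List.drop_eq_getElem_cons hlt
      obtain ⟨t, ht⟩ := hpre
      rw [hd, hdp] at ht
      injection ht with h1 h2
      exact hp (by rw [h1]; exact List.getElem_mem hlt)
    · exact heq
    · exfalso
      refine hmin p.length hgt ⟨r, ?_⟩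
      simp [List.drop_left]
  have := Int.toNat_of_nonneg h0
  omega

theorem pvTickSplit {cs : List Char} (h : '`' ∈ cs) :
    ∃ p r, cs = p ++ '`' :: r ∧ '`' ∉ p := by
  induction cs with
  | nil => simp at h
  | cons c rest ih =>
    by_cases hc : c = '`'
    · exact ⟨[], rest, by simp [hc], by simp⟩
    · have : '`' ∈ rest := by
        rcases List.mem_cons.mp h with h' | h'
        · exact absurd h'.symm hc
        · exact h'
      obtain ⟨p, r, rfl, hp⟩ := ih this
      exact ⟨c :: p, r, rfl, by simp [Ne.symm hc, hp, hc]⟩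

theorem pvLoopA_tick_none {r : List Char} (hr : '`' ∉ r)
    (out : List (List Char)) (abn nba : PySem.Dict (List Char) (List Char)) :
    pvLoopA ('`' :: r) out abn nba = none := by
  rw [pvLoopA]
  simp [pvFindNoTick hr]

theorem pvLoopA_tick {p2 : List Char} (r2 : List Char) (hp2 : '`' ∉ p2) (hne : p2 ≠ [])
    (out : List (List Char)) (abn nba : PySem.Dict (List Char) (List Char)) :
    pvLoopA ('`' :: (p2 ++ '`' :: r2)) out abn nba =
      (match abn.get? p2 with
       | some al => pvLoopA r2 (out ++ [al]) abn nba
       | none =>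
         pvLoopA r2 (out ++ ['_' :: 'b' :: 't' :: '_' :: PySem.Int.toChars (abn.size : Int)])
           (abn.insert p2 ('_' :: 'b' :: 't' :: '_' :: PySem.Int.toChars (abn.size : Int)))
           (nba.insert ('_' :: 'b' :: 't' :: '_' :: PySem.Int.toChars (abn.size : Int)) p2)) := by
  rw [pvLoopA]
  have hfind := pvFindFirstTick p2 r2 hp2
  have htake : (p2 ++ '`' :: r2).take p2.length = p2 := by
    simpa using List.take_left (l₁ := p2) (l₂ := '`' :: r2)
  have hdrop : (p2 ++ '`' :: r2).drop (p2.length + 1) = r2 := by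
    have : p2 ++ '`' :: r2 = (p2 ++ ['`']) ++ r2 := by simp
    rw [this]
    exact List.drop_left' (by simp)
  simp [hfind, htake, hdrop, hne]

theorem pvFlatten_map_singleton (p : List Char) : (p.map (fun c => [c])).flatten = p := by
  simpa [pvJoin_flatten] using PySem.Chars.join_nil_singletons (cs := p)

def pvRel : Option (List (List Char) × PySem.Dict (List Char) (List Char)) →
    Option (List (List Char) × PySem.Dict (List Char) (List Char)) → Prop
  | none, none => True
  | some (o1, d1), some (o2, d2) =>
      PySem.Chars.join [] o1 = PySem.Chars.join [] o2 ∧ d1 = d2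
  | _, _ => False

theorem pvMain_noTick {cs : List Char} (h : '`' ∉ cs)
    (out1 out2 : List (List Char)) (abn nba : PySem.Dict (List Char) (List Char))
    (hj : PySem.Chars.join [] out1 = PySem.Chars.join [] out2) :
    pvRel (pvLoopA cs out1 abn nba)
      (match pvSplit cs with
       | [] => none
       | p :: ps => pvLoopB ps (out2 ++ [p]) abn nba) := by
  rw [pvSplit_no_tick h]
  have h1 := pvLoopA_pre cs h [] out1 abn nba
  rw [List.append_nil] at h1
  rw [h1]
  simp only [pvLoopA, pvLoopB]
  refine ⟨?_, rfl⟩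
  simp only [pvJoin_flatten] at hj ⊢
  simp [hj, pvFlatten_map_singleton]

theorem pvMain : ∀ (n : Nat) (cs : List Char), cs.length ≤ n →
    ∀ (out1 out2 : List (List Char)) (abn nba : PySem.Dict (List Char) (List Char)),
    PySem.Chars.join [] out1 = PySem.Chars.join [] out2 →
    pvRel (pvLoopA cs out1 abn nba)
      (match pvSplit cs with
       | [] => none
       | p :: ps => pvLoopB ps (out2 ++ [p]) abn nba) := by
  intro n
  induction n with
  | zero =>
    intro cs hlen out1 out2 abn nba hj
    have : cs = [] := by cases cs with | nil => rfl | cons a b => simp at hlen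
    subst this
    exact pvMain_noTick (by simp) out1 out2 abn nba hj
  | succ n ih =>
    intro cs hlen out1 out2 abn nba hj
    by_cases hmem : '`' ∈ cs
    · obtain ⟨p, r, rfl, hp⟩ := pvTickSplit hmem
      rw [pvSplit_append_tick r hp, pvLoopA_pre p hp]
      by_cases hr : '`' ∈ r
      · obtain ⟨p2, r2, rfl, hp2⟩ := pvTickSplit hr
        rw [pvSplit_append_tick r2 hp2]
        rcases hsp2 : pvSplit r2 with _ | ⟨q, qs⟩
        · exact absurd hsp2 (pvSplit_ne_nil r2)
        · by_cases hp2e : p2 = []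
          · subst hp2e
            simp only [List.nil_append]
            rw [pvLoopA]
            have h0 : PySem.Chars.find ('`' :: r2) ['`'] = 0 := by
              simpa using pvFindFirstTick [] ('`' :: r2).tail (by simp)
            simp [h0, pvLoopB, pvRel]
          · rw [pvLoopA_tick r2 hp2 hp2e]
            have hlen2 : r2.length ≤ n := by simp at hlen; omega
            have hjoin2 : ∀ al : List Char,
                PySem.Chars.join [] (out1 ++ p.map (fun c => [c]) ++ [al])
                  = PySem.Chars.join [] ((out2 ++ [p]) ++ [al]) := by
              intro al
              simp only [pvJoin_flatten] at hj ⊢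
              simp [hj, pvFlatten_map_singleton]
            rcases habn : abn.get? p2 with _ | al
            · -- fresh name
              have hrec := ih r2 hlen2
                (out1 ++ p.map (fun c => [c]) ++ ['_' :: 'b' :: 't' :: '_' :: PySem.Int.toChars (abn.size : Int)])
                ((out2 ++ [p]) ++ ['_' :: 'b' :: 't' :: '_' :: PySem.Int.toChars (abn.size : Int)])
                (abn.insert p2 ('_' :: 'b' :: 't' :: '_' :: PySem.Int.toChars (abn.size : Int)))
                (nba.insert ('_' :: 'b' :: 't' :: '_' :: PySem.Int.toChars (abn.size : Int)) p2)
                (hjoin2 _)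
              rw [hsp2] at hrec
              simp only [pvLoopB, if_neg hp2e, habn]
              simpa [List.append_assoc] using hrec
            · have hrec := ih r2 hlen2
                (out1 ++ p.map (fun c => [c]) ++ [al]) ((out2 ++ [p]) ++ [al]) abn nba (hjoin2 al)
              rw [hsp2] at hrec
              simp only [pvLoopB, if_neg hp2e, habn]
              simpa [List.append_assoc] using hrec
      · rw [pvSplit_no_tick hr, pvLoopA_tick_none hr]
        simp only [pvLoopB]
        trivial
    · exact pvMain_noTick hmem out1 out2 abn nba hj

theorem pvPorts_eq (formula : String) :
    backtick_preprocess_py formula = backtick_preprocess_py_alt formula := by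
  unfold backtick_preprocess_py backtick_preprocess_py_alt
  rw [pvSplitOn_eq]
  have hmain := pvMain formula.toList.length formula.toList le_rfl [] []
    PySem.Dict.empty PySem.Dict.empty rfl
  rcases hsp : pvSplit formula.toList with _ | ⟨p, ps⟩
  · exact absurd hsp (pvSplit_ne_nil _)
  · rw [hsp] at hmain
    replace hmain : pvRel (pvLoopA formula.toList [] PySem.Dict.empty PySem.Dict.empty)
        (pvLoopB ps [p] PySem.Dict.empty PySem.Dict.empty) := by
      simpa using hmain
    by_cases hpar : (p :: ps).length % 2 = 0
    · have hodd : ps.length % 2 = 1 := by simp at hpar; omega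
      rw [pvLoopB_odd_none ps _ _ _ hodd] at hmain
      rcases hA : pvLoopA formula.toList [] PySem.Dict.empty PySem.Dict.empty with _ | ⟨o, d⟩
      · rw [if_pos hpar]
      · rw [hA] at hmain
        exact absurd hmain (by simp [pvRel])
    · rcases hA : pvLoopA formula.toList [] PySem.Dict.empty PySem.Dict.empty with _ | ⟨o1, d1⟩ <;>
        rcases hB : pvLoopB ps [p] PySem.Dict.empty PySem.Dict.empty with _ | ⟨o2, d2⟩ <;>
        rw [hA, hB] at hmain
      · rw [if_neg hpar]
        show ("", []) = (match pvLoopB ps [p] PySem.Dict.empty PySem.Dict.empty with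
          | none => (("" : String), ([] : List (String × String)))
          | some (pieces, nba) =>
            (String.ofList (PySem.Chars.join [] pieces),
             nba.items.map (fun q => (String.ofList q.1, String.ofList q.2))))
        rw [hB]
      · exact absurd hmain (by simp [pvRel])
      · exact absurd hmain (by simp [pvRel])
      · obtain ⟨hjo, hd⟩ : PySem.Chars.join [] o1 = PySem.Chars.join [] o2 ∧ d1 = d2 := by
          simpa [pvRel] using hmain
        rw [if_neg hpar]
        show (String.ofList (PySem.Chars.join [] o1),
              d1.items.map (fun q => (String.ofList q.1, String.ofList q.2)))
            = (match pvLoopB ps [p] PySem.Dict.empty PySem.Dict.empty with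
          | none => (("" : String), ([] : List (String × String)))
          | some (pieces, nba) =>
            (String.ofList (PySem.Chars.join [] pieces),
             nba.items.map (fun q => (String.ofList q.1, String.ofList q.2))))
        rw [hB]
        simp [hjo, hd]

-- ===== VERDICT (by name: the statement is the Claim_ definition above) =====
theorem backtick_preprocess_py_spec : Claim_equal_backtick_preprocess_py := by
  intro formula _ _
  exact pvPorts_eq formula
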